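-- pv_equiv track=rewrite | github.com/frankGonzalez22/TIP101_TRAINING_GROUNDS_RAHHH | Tip101_Unit2_Session2.py | get_highest_priority_task
-- ===== SOURCE A (Python) =====
-- def get_highest_priority_task(tasks):
--     keyValues = tasks.values()
--     maxVal = max(keyValues)
--     output =""
--     for keys, keyVals in tasks.items():
--         if keyVals==maxVal:
--             output = keys
--             tasks.pop(keys)
--             return output
--
--     return output
-- ===== SOURCE B (Python) =====
-- def get_highest_priority_task(tasks):
--     best_key = None
--     best_val = None
--     for k, v in tasks.items():
--         if best_val is None or v > best_val:
--             best_key, best_val = k, v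
--     if best_key is None:
--         raise ValueError("max() arg is an empty sequence")
--     tasks.pop(best_key)
--     return best_key
-- ===== Notes on version B (the rewrite author's own statement) =====
-- stated objective: simpler
-- what changed: B replaces A's two passes (max() over the values, then a second scan for the first key with that value) by a single pass keeping the best key/value with a strict-greater update, so ties keep the earliest key.
import Mathlib
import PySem

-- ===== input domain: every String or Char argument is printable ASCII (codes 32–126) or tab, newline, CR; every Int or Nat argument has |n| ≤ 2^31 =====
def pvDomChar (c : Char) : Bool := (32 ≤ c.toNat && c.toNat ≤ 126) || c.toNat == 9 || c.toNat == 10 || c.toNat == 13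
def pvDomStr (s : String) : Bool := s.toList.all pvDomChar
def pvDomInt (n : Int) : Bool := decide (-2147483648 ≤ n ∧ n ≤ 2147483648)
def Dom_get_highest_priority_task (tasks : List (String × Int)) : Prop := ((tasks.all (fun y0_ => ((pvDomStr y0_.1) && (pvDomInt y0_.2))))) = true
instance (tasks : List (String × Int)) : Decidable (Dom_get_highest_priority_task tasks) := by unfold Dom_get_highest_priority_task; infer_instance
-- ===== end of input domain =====

-- B replaces A's two passes (max over the values, then a scan for the first key with that
-- value) by a single pass keeping the best key/value with a strict-greater update (simpler).
-- Both A and B pop the returned key from the dict; the equivalence proved here is about the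
-- return value (B performs the same mutation in Python).

-- ===== PORT A =====
-- the for-loop of A: first key whose value equals maxVal, else the initial output "".
def pvAScan (maxVal : Int) : List (String × Int) → String
  | [] => ""
  | (k, v) :: t => if v == maxVal then k else pvAScan maxVal t

def get_highest_priority_task (tasks : List (String × Int)) : String :=
  let keyValues := tasks.map Prod.snd
  match PySem.List.max? keyValues (fun y => y) with
  | none => ""            -- Python: max() raises ValueError; excluded by Pre_
  | some maxVal => pvAScan maxVal tasks   -- (the pop is a side effect, not the return value)

-- ===== PORT B =====
-- B's single loop: keep (best_key, best_val), replace only on strictly greater value.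
def pvBStep (acc : Option (String × Int)) (kv : String × Int) : Option (String × Int) :=
  match acc with
  | none => some kv
  | some b => if b.2 < kv.2 then some kv else some b

def get_highest_priority_task_alt (tasks : List (String × Int)) : String :=
  match tasks.foldl pvBStep none with
  | none => ""            -- Python: raise ValueError; excluded by Pre_
  | some b => b.1

-- ===== PRECONDITION & SPEC =====
-- Pre_ excludes only the empty dict, on which both Pythons raise ValueError.
def Pre_get_highest_priority_task (tasks : List (String × Int)) : Prop := tasks ≠ []
instance (tasks : List (String × Int)) : Decidable (Pre_get_highest_priority_task tasks) := by unfold Pre_get_highest_priority_task; infer_instance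
def pvWitness_get_highest_priority_task : (List (String × Int)) := [("a", 1), ("b", 2)]

def Spec_get_highest_priority_task (tasks : List (String × Int)) (out : String) : Prop := out = get_highest_priority_task_alt tasks
instance (tasks : List (String × Int)) (out : String) : Decidable (Spec_get_highest_priority_task tasks out) := by unfold Spec_get_highest_priority_task; infer_instance

-- ===== CLAIM (what is proved, stated in full; the proofs are below) =====
def Claim_equal_get_highest_priority_task : Prop := ∀ (tasks : List (String × Int)), Dom_get_highest_priority_task tasks → Pre_get_highest_priority_task tasks → Spec_get_highest_priority_task tasks (get_highest_priority_task tasks)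

-- ===== LEMMAS AND PROOFS =====

-- running max of the values of l starting from bv
def pvMaxFrom (bv : Int) (l : List (String × Int)) : Int :=
  l.foldl (fun a x => max a x.2) bv

lemma pvMaxFrom_ge (l : List (String × Int)) (bv : Int) : bv ≤ pvMaxFrom bv l := by
  induction l generalizing bv with
  | nil => simp [pvMaxFrom]
  | cons x t ih =>
      have h := ih (max bv x.2)
      simp only [pvMaxFrom, List.foldl_cons] at *
      exact le_trans (le_max_left _ _) h

-- the heart: B's strict-greater fold started at (bk, bv) returns bk if nothing in l beats bv,
-- and otherwise the first key of l whose value equals the running max.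
lemma pvMaxFrom_cons (bv : Int) (k : String) (v : Int) (t : List (String × Int)) :
    pvMaxFrom bv ((k, v) :: t) = pvMaxFrom (max bv v) t := rfl

lemma pvFold_char (l : List (String × Int)) (bk : String) (bv : Int) :
    l.foldl pvBStep (some (bk, bv)) =
      some (if pvMaxFrom bv l ≤ bv then bk else pvAScan (pvMaxFrom bv l) l, pvMaxFrom bv l) := by
  induction l generalizing bk bv with
  | nil => simp [pvMaxFrom]
  | cons x t ih =>
      obtain ⟨k, v⟩ := x
      rw [List.foldl_cons, pvMaxFrom_cons]
      simp only [pvBStep]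
      by_cases h : bv < v
      · have hmv : max bv v = v := by omega
        rw [if_pos h, hmv, ih k v]
        have hge : v ≤ pvMaxFrom v t := pvMaxFrom_ge t v
        have hnb : ¬ (pvMaxFrom v t ≤ bv) := by omega
        rw [if_neg hnb]
        simp only [pvAScan, beq_iff_eq]
        by_cases h2 : pvMaxFrom v t ≤ v
        · have he : pvMaxFrom v t = v := le_antisymm h2 hge
          rw [if_pos h2, if_pos he.symm]
        · have hvne : ¬ (v = pvMaxFrom v t) := by omega
          rw [if_neg h2, if_neg hvne]
      · have hmv : max bv v = bv := by omega
        rw [if_neg h, hmv, ih bk bv]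
        have hge : bv ≤ pvMaxFrom bv t := pvMaxFrom_ge t bv
        by_cases h2 : pvMaxFrom bv t ≤ bv
        · rw [if_pos h2, if_pos h2]
        · have hvne : ¬ (v = pvMaxFrom bv t) := by omega
          rw [if_neg h2, if_neg h2]
          simp only [pvAScan, beq_iff_eq]
          rw [if_neg hvne]

lemma pvMax_values (k : String) (v : Int) (t : List (String × Int)) :
    PySem.List.max? (((k, v) :: t).map Prod.snd) (fun y => y) = some (pvMaxFrom v t) := by
  rw [List.map_cons, PySem.List.max?_id_cons]
  congr 1
  induction t generalizing v with
  | nil => simp [pvMaxFrom]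
  | cons x s ih => simp only [List.map_cons, List.foldl_cons, pvMaxFrom] at *; exact ih (max v x.2)

-- ===== VERDICT (by name: the statement is the Claim_ definition above) =====
theorem get_highest_priority_task_spec : Claim_equal_get_highest_priority_task := by
  intro tasks _ hpre
  unfold Spec_get_highest_priority_task get_highest_priority_task get_highest_priority_task_alt
  match tasks with
  | [] => exact absurd rfl hpre
  | (k, v) :: t =>
      rw [List.foldl_cons]
      simp only [pvMax_values, pvBStep, pvFold_char t k v]
      by_cases h : pvMaxFrom v t ≤ v
      · have he : pvMaxFrom v t = v := le_antisymm h (pvMaxFrom_ge t v)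
        rw [if_pos h]
        simp only [pvAScan, beq_iff_eq]
        rw [if_pos he.symm]
      · have hvne : ¬ (v = pvMaxFrom v t) := by omega
        rw [if_neg h]
        simp only [pvAScan, beq_iff_eq]
        rw [if_neg hvne]
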